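-- pv_equiv track=rewrite | github.com/JunseoMin/RoadToDiamond | Python3/프로그래머스/2/131704. 택배상자/택배상자.py | solution
-- ===== SOURCE A (Python) =====
-- from collections import deque
--
-- def solution(order):
--     answer = 0
--     belt = [i for i in range(1,len(order) + 1)]
--     sub = []
--     queue = deque(belt)
--     i = 0
--
--     while queue:
--         v = queue.popleft()
--         if v != order[i]:
--             sub.append(v)
--         elif v == order[i]:
--             answer += 1
--             i += 1
--
--         while len(sub) and sub[-1] == order[i]:
--             sub.pop()
--             i+=1
--             answer += 1
--
--     return answer
-- ===== SOURCE B (Python) =====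
-- def solution(order):
--     n = len(order)
--     stack = []
--     belt = 1
--     answer = 0
--     for target in order:
--         while belt <= n and (not stack or stack[-1] != target):
--             stack.append(belt)
--             belt += 1
--         if stack and stack[-1] == target:
--             stack.pop()
--             answer += 1
--         else:
--             break
--     return answer
-- ===== Notes on version B (the rewrite author's own statement) =====
-- stated objective: simpler
-- what changed: B drops the deque and inverts the control flow: instead of A's outer loop over belt numbers with an inner stack-drain, B loops over the targets, lazily pushes belt numbers onto a single stack until the top matches, and breaks at the first undeliverable target. (no deque construction, and the break stops work at the first failure)
import Mathlib
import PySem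

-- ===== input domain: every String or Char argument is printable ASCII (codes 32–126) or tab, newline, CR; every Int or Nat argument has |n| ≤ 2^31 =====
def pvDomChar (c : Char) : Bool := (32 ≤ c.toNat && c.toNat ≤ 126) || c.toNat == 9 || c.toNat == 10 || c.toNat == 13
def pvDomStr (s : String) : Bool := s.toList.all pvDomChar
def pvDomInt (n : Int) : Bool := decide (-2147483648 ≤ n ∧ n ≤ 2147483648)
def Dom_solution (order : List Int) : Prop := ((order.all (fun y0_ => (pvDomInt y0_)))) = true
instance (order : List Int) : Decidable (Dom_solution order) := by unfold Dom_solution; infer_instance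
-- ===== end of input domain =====

-- B inverts A's control flow: an outer loop over the targets that pushes belt numbers
-- on demand and breaks at the first undeliverable target (objective: simpler).

-- ===== PORT A =====
-- stacks are represented with the top at the HEAD of the list (Python appends/pops at the end).
-- 'order[i]' is ported as 'order.getD i 0': A only evaluates it while i < len(order)
-- (each delivered parcel advances i by one and consumes one belt number), so the default is never used.

-- inner 'while len(sub) and sub[-1] == order[i]' loop of A
def aDrain (order : List Int) (sub : List Int) (i : Nat) (ans : Int) : List Int × Nat × Int :=
  match sub with
  | [] => ([], i, ans)
  | x :: rest =>
    if x = order.getD i 0 then aDrain order rest (i + 1) (ans + 1)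
    else (x :: rest, i, ans)

-- outer 'while queue' loop of A (queue popped from the left)
def aLoop (order : List Int) (q : List Int) (sub : List Int) (i : Nat) (ans : Int) : Int :=
  match q with
  | [] => ans
  | v :: q' =>
    if v = order.getD i 0 then
      match aDrain order sub (i + 1) (ans + 1) with
      | (s', i', a') => aLoop order q' s' i' a'
    else
      match aDrain order (v :: sub) i ans with
      | (s', i', a') => aLoop order q' s' i' a'

def solution (order : List Int) : Int :=
  aLoop order (PySem.List.pyRange 1 ((order.length : Int) + 1) 1) [] 0 0

-- ===== PORT B =====
-- inner 'while belt <= n and (not stack or stack[-1] != target)' loop of B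
def bPush (n target : Int) (stack : List Int) (belt : Int) : List Int × Int :=
  if h : belt ≤ n ∧ stack.head? ≠ some target then
    bPush n target (belt :: stack) (belt + 1)
  else (stack, belt)
termination_by (n + 1 - belt).toNat
decreasing_by omega

-- outer 'for target in order' loop of B ('break' returns the current answer)
def bLoop (n : Int) (ts : List Int) (stack : List Int) (belt : Int) (ans : Int) : Int :=
  match ts with
  | [] => ans
  | t :: ts' =>
    match bPush n t stack belt with
    | (x :: rest, b') => if x = t then bLoop n ts' rest b' (ans + 1) else ans
    | ([], _) => ans

def solution_alt (order : List Int) : Int :=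
  bLoop (order.length : Int) order [] 1 0

-- ===== PRECONDITION & SPEC =====
def Spec_solution (order : List Int) (out : Int) : Prop := out = solution_alt order
instance (order : List Int) (out : Int) : Decidable (Spec_solution order out) := by unfold Spec_solution; infer_instance

-- ===== CLAIM (what is proved, stated in full; the proofs are below) =====
def Claim_equal_solution : Prop := ∀ (order : List Int), Dom_solution order → Spec_solution order (solution order)

-- ===== LEMMAS AND PROOFS =====

-- the ascending list [b, b+1, …, b+k-1], a structural handle on A's queue
def seg (b : Int) : Nat → List Int
  | 0 => []
  | k + 1 => b :: seg (b + 1) k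

theorem pyRange_eq_seg : ∀ (k : Nat) (b : Int), PySem.List.pyRange b (b + k) 1 = seg b k := by
  intro k
  induction k with
  | zero => intro b; simp [seg, PySem.List.pyRange_one_eq_nil]
  | succ k ih =>
    intro b
    rw [PySem.List.pyRange_one_cons (by push_cast; omega), seg]
    congr 1
    rw [show b + ((k + 1 : Nat) : Int) = (b + 1) + (k : Int) by push_cast; ring]
    exact ih (b + 1)

-- if drop i is nonempty, its head is order.getD i 0 and its tail is drop (i+1)
theorem drop_head (order : List Int) (i : Nat) (t : Int) (ts' : List Int)
    (h : order.drop i = t :: ts') :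
    t = order.getD i 0 ∧ order.drop (i + 1) = ts' ∧ i < order.length := by
  have hi : i < order.length := by
    by_contra hge
    rw [List.drop_eq_nil_of_le (by omega)] at h
    exact absurd h (by simp)
  have h2 := List.drop_eq_getElem_cons hi (l := order)
  rw [h] at h2
  refine ⟨?_, ?_, hi⟩
  · rw [List.getD_eq_getElem _ _ hi]; exact (List.cons.inj h2).1
  · exact (List.cons.inj h2).2.symm

-- bPush stops immediately when the stack top is the target (or the belt is exhausted)
theorem bPush_stop {n target belt : Int} {stack : List Int}
    (h : ¬ (belt ≤ n ∧ stack.head? ≠ some target)) :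
    bPush n target stack belt = (stack, belt) := by
  rw [bPush]; simp [h]

-- bPush takes one pushing step
theorem bPush_step {n target belt : Int} {stack : List Int}
    (h : belt ≤ n ∧ stack.head? ≠ some target) :
    bPush n target stack belt = bPush n target (belt :: stack) (belt + 1) := by
  conv_lhs => rw [bPush]
  simp [h]

-- simulation of A's drain loop by B's outer loop (B pushes nothing while delivering from the stack)
theorem drain_sim (order : List Int) (n : Int) (b : Int) :
    ∀ (s : List Int) (j : Nat) (a : Int),
    (∀ x ∈ s, 1 ≤ x) →
    match aDrain order s j a with
    | (s', i', a') =>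
      bLoop n (order.drop j) s b a = bLoop n (order.drop i') s' b a'
      ∧ (s'.head? ≠ some (order.getD i' 0))
      ∧ (∀ x ∈ s', 1 ≤ x) := by
  intro s
  induction s with
  | nil =>
    intro j a _
    simp [aDrain]
  | cons x rest ih =>
    intro j a hpos
    by_cases hx : x = order.getD j 0
    · have hx1 : (1 : Int) ≤ x := hpos x (by simp)
      have hj : j < order.length := by
        by_contra hge
        rw [List.getD_eq_default _ _ (by omega)] at hx
        omega
      have hdrop : order.drop j = order.getD j 0 :: order.drop (j + 1) := by
        rw [List.getD_eq_getElem _ _ hj, List.drop_eq_getElem_cons hj]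
      have hrec := ih (j + 1) (a + 1) (fun y hy => hpos y (by simp [hy]))
      rw [aDrain, if_pos hx]
      revert hrec
      cases hd : aDrain order rest (j + 1) (a + 1) with
      | mk s' r =>
        cases r with
        | mk i' a' =>
          intro ⟨h1, h2, h3⟩
          refine ⟨?_, h2, h3⟩
          rw [hdrop, bLoop, bPush_stop (by simp [hx])]
          show (if x = order.getD j 0 then
              bLoop n (List.drop (j + 1) order) rest b (a + 1) else a) =
            bLoop n (List.drop i' order) s' b a'
          rw [if_pos hx, h1]
    · rw [aDrain, if_neg hx]
      exact ⟨rfl, by simpa using hx, hpos⟩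

-- main simulation: A's outer loop over the remaining belt segment equals B's loop over the remaining targets
theorem key (order : List Int) (n : Int) (hn : n = (order.length : Int)) :
    ∀ (k : Nat) (b : Int) (s : List Int) (i : Nat) (ans : Int),
    b + k = n + 1 → 1 ≤ b →
    (s.head? ≠ some (order.getD i 0)) →
    (∀ x ∈ s, 1 ≤ x) →
    aLoop order (seg b k) s i ans = bLoop n (order.drop i) s b ans := by
  intro k
  induction k with
  | zero =>
    intro b s i ans hbk hb hhead hpos
    rw [seg, aLoop]
    cases hdrop : order.drop i with
    | nil => rw [bLoop]
    | cons t ts' =>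
      obtain ⟨ht, -, -⟩ := drop_head order i t ts' hdrop
      rw [bLoop, bPush_stop (by intro h; omega)]
      cases s with
      | nil => rfl
      | cons x rest =>
        have hxt : x ≠ t := by
          rw [ht]
          simpa using hhead
        show ans = if x = t then bLoop n ts' rest b (ans + 1) else ans
        rw [if_neg hxt]
  | succ k ih =>
    intro b s i ans hbk hb hhead hpos
    have hbn : b ≤ n := by push_cast at hbk; omega
    rw [seg, aLoop]
    by_cases hv : b = order.getD i 0
    · -- A delivers b, then drains; B pushes b once, delivers it, then pops the drained items
      have hi : i < order.length := by
        by_contra hge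
        rw [List.getD_eq_default _ _ (by omega)] at hv
        omega
      have hdrop : order.drop i = order.getD i 0 :: order.drop (i + 1) := by
        rw [List.getD_eq_getElem _ _ hi, List.drop_eq_getElem_cons hi]
      rw [if_pos hv]
      have hsim := drain_sim order n (b + 1) s (i + 1) (ans + 1) hpos
      revert hsim
      cases hd : aDrain order s (i + 1) (ans + 1) with
      | mk s' r =>
        cases r with
        | mk i' a' =>
          intro ⟨h1, h2, h3⟩
          rw [hdrop, bLoop, bPush_step ⟨hbn, hhead⟩,
            bPush_stop (by simp [hv])]
          show aLoop order (seg (b + 1) k) s' i' a' =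
            if b = order.getD i 0 then
              bLoop n (List.drop (i + 1) order) s (b + 1) (ans + 1)
            else ans
          rw [if_pos hv, h1]
          exact ih (b + 1) s' i' a' (by push_cast at hbk ⊢; omega) (by omega) h2 h3
    · -- A pushes b onto sub (the drain does nothing); B will push it lazily
      rw [if_neg hv, aDrain, if_neg hv]
      have hstep : bLoop n (order.drop i) s b ans = bLoop n (order.drop i) (b :: s) (b + 1) ans := by
        cases hdrop : order.drop i with
        | nil => rw [bLoop, bLoop]
        | cons t ts' =>
          obtain ⟨ht, -, -⟩ := drop_head order i t ts' hdrop
          rw [bLoop, bLoop, bPush_step ⟨hbn, by rw [ht]; exact hhead⟩]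
      rw [hstep]
      exact ih (b + 1) (b :: s) i ans (by push_cast at hbk ⊢; omega) (by omega)
        (by simpa using fun h => hv h)
        (by intro x hx; rcases List.mem_cons.mp hx with h | h
            · omega
            · exact hpos x h)

-- ===== VERDICT (by name: the statement is the Claim_ definition above) =====
theorem solution_spec : Claim_equal_solution := by
  intro order _
  unfold Spec_solution solution solution_alt
  rw [show ((order.length : Int) + 1) = 1 + (order.length : Nat) by omega,
    pyRange_eq_seg]
  have := key order (order.length : Int) rfl order.length 1 [] 0 0 (by ring) (by norm_num)
    (by simp) (by simp)
  rw [List.drop_zero] at this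
  exact this
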